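-- pv_equiv track=rewrite | github.com/sopolat/stateful_virtualization | publication_deneme.py | dataParse2
-- ===== SOURCE A (Python) =====
-- import string
--
-- def dataParse2(reqs,ress):
--     reqs2=[]
--     ress2=[]
--     for req,res in zip(reqs, ress):
--         data=[]
--         data2=[]
--         req2=[]
--         res2=[]
--         for a,b in zip(req,res):
--             newData=[]
--             if(a[0:3] =="0TK" or a[0:2]=="0O" ):
--                 for tk in a.split("|"):
--                     index=3
--                     while(tk[index] in string.digits):
--                         index +=1
--                     newData.append(tk[0:index]+" "+tk[index]+" "+tk[index+1:index+6]+" "+tk[index+6:index+12]+" "+tk[index+12:len(a)])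
--                 data.append(" | ".join(newData))
--                 data2.append(b.split("*T R O Y A*")[0])
--             else:
--                 data.append(a)
--                 data2.append(b.split("*T R O Y A*")[0])
--             req2.append(" ".join(data))
--             res2.append(" ".join(data2))
--         reqs2.append(req2)
--         ress2.append(res2)
--     return reqs2 , ress2
-- ===== SOURCE B (Python) =====
-- import string
--
--
-- def dataParse2(reqs, ress):
--     # Two-pass per pair: first build the transformed token lists, then turn each
--     # into its list of growing space-joined prefixes by a running accumulation.
--     def reform(a):
--         if a[0:3] == "0TK" or a[0:2] == "0O":
--             parts = []
--             for tk in a.split("|"):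
--                 index = 3 + digit_run(tk[3:])
--                 parts.append(tk[0:index] + " " + tk[index] + " " + tk[index + 1:index + 6]
--                              + " " + tk[index + 6:index + 12] + " " + tk[index + 12:len(a)])
--             return " | ".join(parts)
--         return a
--
--     def before_marker(b):
--         return b.split("*T R O Y A*")[0]
--
--     def digit_run(s):
--         n = 0
--         while n < len(s) and s[n] in string.digits:
--             n += 1
--         return n
--
--     def prefixes(words):
--         out = []
--         acc = None
--         for w in words:
--             acc = w if acc is None else acc + " " + w
--             out.append(acc)
--         return out
--
--     pairs = list(zip(reqs, ress))
--     reqs2 = [prefixes([reform(a) for a, _ in zip(req, res)]) for req, res in pairs]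
--     ress2 = [prefixes([before_marker(b) for _, b in zip(req, res)]) for req, res in pairs]
--     return reqs2, ress2
-- ===== Notes on version B (the rewrite author's own statement) =====
-- stated objective: alternative
-- what changed: B splits A's interleaved inner loop (append, then re-join the whole growing list at every element) into two separate passes - one pass that only transforms the tokens, then a running-accumulation pass that derives each growing space-joined prefix from the previous one - and computes the digit-scan index as the length of the leading digit run of tk[3:] instead of A's unbounded index while-loop.
import Mathlib
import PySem

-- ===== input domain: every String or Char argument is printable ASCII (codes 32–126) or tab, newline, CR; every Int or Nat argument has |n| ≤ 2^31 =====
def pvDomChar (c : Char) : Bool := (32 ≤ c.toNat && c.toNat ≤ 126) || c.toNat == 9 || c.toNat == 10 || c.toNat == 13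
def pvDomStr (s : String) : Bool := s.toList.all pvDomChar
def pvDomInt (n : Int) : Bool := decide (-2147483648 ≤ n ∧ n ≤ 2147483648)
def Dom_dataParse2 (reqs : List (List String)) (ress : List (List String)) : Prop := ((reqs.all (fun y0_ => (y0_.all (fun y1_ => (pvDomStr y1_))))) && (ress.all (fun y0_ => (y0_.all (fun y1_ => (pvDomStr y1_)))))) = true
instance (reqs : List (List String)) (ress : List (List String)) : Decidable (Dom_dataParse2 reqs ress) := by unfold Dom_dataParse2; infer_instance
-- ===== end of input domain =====

-- B separates A's interleaved append-and-rejoin inner loop into two passes (transform, then a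
-- running prefix accumulation) and computes the digit scan as a run length; same return value.

-- shared small primitives (both Pythons contain these very expressions)
-- a[0:3] == "0TK" or a[0:2] == "0O"
def dpCond (a : String) : Bool :=
  PySem.Str.slice a (some 0) (some 3) == "0TK" || PySem.Str.slice a (some 0) (some 2) == "0O"

-- a.split("|")  (separator non-empty, so split? always returns some)
def dpSplit (a : String) : List String := (PySem.Str.split? a "|").getD []

-- c in string.digits  (membership of the one-character string in '0123456789')
def dpIsDigit (c : Char) : Bool := PySem.Str.isIn (String.ofList [c]) "0123456789"

-- b.split("*T R O Y A*")[0]  (split with a non-empty separator is never empty)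
def dpFirst (b : String) : String := ((PySem.Str.split? b "*T R O Y A*").getD []).headD ""

-- ===== PORT A =====
-- A's while loop:  index=3; while tk[index] in string.digits: index += 1
-- (the range guard only totalizes it: Python raises IndexError where the guard fails, outside Pre_)
def dpScan (tk : String) (index : Nat) : Nat :=
  if h : index < tk.toList.length then
    if dpIsDigit tk.toList[index] then dpScan tk (index + 1) else index
  else index
termination_by tk.toList.length - index
decreasing_by omega

def dataParse2 (reqs : List (List String)) (ress : List (List String)) : List (List String) × List (List String) :=
  (reqs.zip ress).foldl
    (fun st pr =>
      let inner := (pr.1.zip pr.2).foldl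
        (fun s ab =>
          let a := ab.1
          let b := ab.2
          let dd :=
            if dpCond a then
              let newData := (dpSplit a).foldl
                (fun nd tk =>
                  let index := dpScan tk 3
                  nd ++ [PySem.Str.slice tk (some 0) (some (index : Int)) ++ " " ++
                         String.ofList [(PySem.Str.pyGet? tk (index : Int)).getD ' '] ++ " " ++
                         PySem.Str.slice tk (some ((index : Int) + 1)) (some ((index : Int) + 6)) ++ " " ++
                         PySem.Str.slice tk (some ((index : Int) + 6)) (some ((index : Int) + 12)) ++ " " ++
                         PySem.Str.slice tk (some ((index : Int) + 12)) (some (PySem.Str.len a))]) []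
              (s.1 ++ [PySem.Str.join " | " newData], s.2.1 ++ [dpFirst b])
            else
              (s.1 ++ [a], s.2.1 ++ [dpFirst b])
          (dd.1, dd.2, s.2.2.1 ++ [PySem.Str.join " " dd.1], s.2.2.2 ++ [PySem.Str.join " " dd.2]))
        (([] : List String), ([] : List String), ([] : List String), ([] : List String))
      (st.1 ++ [inner.2.2.1], st.2 ++ [inner.2.2.2]))
    (([], []) : List (List String) × List (List String))

-- ===== PORT B =====
-- B's digit_run(s): length of the leading run of digit characters
def dpDigitRun : List Char → Nat
  | [] => 0
  | c :: t => if dpIsDigit c then dpDigitRun t + 1 else 0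

-- B's reform(a): transform one token string (same reformatting expressions as A, index as a run length)
def dpReform (a : String) : String :=
  if dpCond a then
    PySem.Str.join " | "
      ((dpSplit a).map (fun tk =>
        let index := 3 + dpDigitRun (PySem.Str.slice tk (some 3) none).toList
        PySem.Str.slice tk (some 0) (some (index : Int)) ++ " " ++
        String.ofList [(PySem.Str.pyGet? tk (index : Int)).getD ' '] ++ " " ++
        PySem.Str.slice tk (some ((index : Int) + 1)) (some ((index : Int) + 6)) ++ " " ++
        PySem.Str.slice tk (some ((index : Int) + 6)) (some ((index : Int) + 12)) ++ " " ++
        PySem.Str.slice tk (some ((index : Int) + 12)) (some (PySem.Str.len a))))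
  else a

-- B's prefixes(words): acc = w if acc is None else acc + " " + w; out.append(acc)
def dpStep (acc : Option String) (w : String) : String :=
  match acc with
  | none => w
  | some s => s ++ " " ++ w

def dpPrefixes (ws : List String) : List String :=
  (ws.foldl (fun st w => let n := dpStep st.1 w; (some n, st.2 ++ [n]))
    ((none, []) : Option String × List String)).2

def dataParse2_alt (reqs : List (List String)) (ress : List (List String)) : List (List String) × List (List String) :=
  ((reqs.zip ress).map (fun pr => dpPrefixes ((pr.1.zip pr.2).map (fun ab => dpReform ab.1))),
   (reqs.zip ress).map (fun pr => dpPrefixes ((pr.1.zip pr.2).map (fun ab => dpFirst ab.2))))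

-- ===== PRECONDITION & SPEC =====
-- Pre_ excludes exactly the inputs where Python A raises IndexError: a reachable reformatted token
-- tk whose characters from position 3 on are all digits (or missing), so the while loop runs off the end.
def Pre_dataParse2 (reqs : List (List String)) (ress : List (List String)) : Prop :=
  ∀ pr ∈ reqs.zip ress, ∀ ab ∈ pr.1.zip pr.2, dpCond ab.1 = true →
    ∀ tk ∈ dpSplit ab.1, ((tk.toList.drop 3).any (fun c => !dpIsDigit c)) = true
instance (reqs : List (List String)) (ress : List (List String)) : Decidable (Pre_dataParse2 reqs ress) := by unfold Pre_dataParse2; infer_instance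

def pvWitness_dataParse2 : List (List String) × List (List String) :=
  ([["0TK12a", "hi"]], [["x*T R O Y A*y", "z"]])

def Spec_dataParse2 (reqs : List (List String)) (ress : List (List String)) (out : List (List String) × List (List String)) : Prop := out = dataParse2_alt reqs ress
instance (reqs : List (List String)) (ress : List (List String)) (out : List (List String) × List (List String)) : Decidable (Spec_dataParse2 reqs ress out) := by unfold Spec_dataParse2; infer_instance

-- ===== CLAIM (what is proved, stated in full; the proofs are below) =====
def Claim_equal_dataParse2 : Prop := ∀ (reqs : List (List String)) (ress : List (List String)), Dom_dataParse2 reqs ress → Pre_dataParse2 reqs ress → Spec_dataParse2 reqs ress (dataParse2 reqs ress)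

-- ===== LEMMAS AND PROOFS =====

-- proof-side names for the two loop bodies, definitionally equal to what the ports inline
def dpStepA (s : List String × List String × List String × List String) (ab : String × String) :
    List String × List String × List String × List String :=
  let a := ab.1
  let b := ab.2
  let dd :=
    if dpCond a then
      let newData := (dpSplit a).foldl
        (fun nd tk =>
          let index := dpScan tk 3
          nd ++ [PySem.Str.slice tk (some 0) (some (index : Int)) ++ " " ++
                 String.ofList [(PySem.Str.pyGet? tk (index : Int)).getD ' '] ++ " " ++
                 PySem.Str.slice tk (some ((index : Int) + 1)) (some ((index : Int) + 6)) ++ " " ++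
                 PySem.Str.slice tk (some ((index : Int) + 6)) (some ((index : Int) + 12)) ++ " " ++
                 PySem.Str.slice tk (some ((index : Int) + 12)) (some (PySem.Str.len a))]) []
      (s.1 ++ [PySem.Str.join " | " newData], s.2.1 ++ [dpFirst b])
    else
      (s.1 ++ [a], s.2.1 ++ [dpFirst b])
  (dd.1, dd.2, s.2.2.1 ++ [PySem.Str.join " " dd.1], s.2.2.2 ++ [PySem.Str.join " " dd.2])

def dpInnerA (pr : List String × List String) :
    List String × List String × List String × List String :=
  (pr.1.zip pr.2).foldl dpStepA ([], [], [], [])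

def dpPStep (st : Option String × List String) (w : String) : Option String × List String :=
  let n := dpStep st.1 w
  (some n, st.2 ++ [n])

def dpJOpt (d : List String) : Option String :=
  match d with | [] => none | _ => some (PySem.Str.join " " d)

-- A's index scan is the starting position plus the digit run length from there on
theorem dpScan_eq (tk : String) (i : Nat) : dpScan tk i = i + dpDigitRun (tk.toList.drop i) := by
  fun_induction dpScan tk i with
  | case1 i h hd ih =>
      rw [ih, List.drop_eq_getElem_cons h, dpDigitRun, if_pos hd]
      omega
  | case2 i h hd =>
      rw [List.drop_eq_getElem_cons h, dpDigitRun, if_neg (by simpa using hd)]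
      omega
  | case3 i h =>
      rw [List.drop_eq_nil_of_le (by omega), dpDigitRun]
      omega

theorem chars_join_append (sep x : List Char) :
    ∀ (l : List (List Char)), l ≠ [] →
      PySem.Chars.join sep (l ++ [x]) = PySem.Chars.join sep l ++ sep ++ x := by
  intro l hl
  induction l with
  | nil => cases hl rfl
  | cons a t ih =>
    cases t with
    | nil => simp [PySem.Chars.join_singleton, PySem.Chars.join_cons_cons]
    | cons b t2 =>
      rw [show (a :: b :: t2) ++ [x] = a :: ((b :: t2) ++ [x]) from rfl,
          show (b :: t2) ++ [x] = b :: (t2 ++ [x]) from rfl,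
          PySem.Chars.join_cons_cons,
          show (b : List Char) :: (t2 ++ [x]) = (b :: t2) ++ [x] from rfl,
          ih (by simp), PySem.Chars.join_cons_cons]
      simp

-- " ".join(d + [x]) is the running-accumulation step applied to the join so far
theorem join_append (d : List String) (x : String) :
    PySem.Str.join " " (d ++ [x]) = dpStep (dpJOpt d) x := by
  match d with
  | [] =>
      apply String.toList_inj.mp
      simp [dpJOpt, dpStep, PySem.Str.toList_join, PySem.Chars.join_singleton]
  | a :: t =>
      apply String.toList_inj.mp
      simp only [dpJOpt, dpStep, PySem.Str.toList_join, List.map_append, List.map_cons,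
        List.map_nil]
      rw [chars_join_append _ _ _ (by simp)]
      simp [PySem.Str.toList_join]

theorem dpJOpt_append (d : List String) (x : String) :
    dpJOpt (d ++ [x]) = some (dpStep (dpJOpt d) x) := by
  have h := join_append d x
  match d with
  | [] => simpa [dpJOpt] using congrArg some h
  | a :: t =>
      rw [List.cons_append]
      simpa only [dpJOpt] using congrArg some h

-- A's per-token expression equals B's: the two index computations agree
theorem token_eq (a tk : String) :
    (let index := dpScan tk 3
     PySem.Str.slice tk (some 0) (some (index : Int)) ++ " " ++
     String.ofList [(PySem.Str.pyGet? tk (index : Int)).getD ' '] ++ " " ++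
     PySem.Str.slice tk (some ((index : Int) + 1)) (some ((index : Int) + 6)) ++ " " ++
     PySem.Str.slice tk (some ((index : Int) + 6)) (some ((index : Int) + 12)) ++ " " ++
     PySem.Str.slice tk (some ((index : Int) + 12)) (some (PySem.Str.len a)))
    = (let index := 3 + dpDigitRun (PySem.Str.slice tk (some 3) none).toList
       PySem.Str.slice tk (some 0) (some (index : Int)) ++ " " ++
       String.ofList [(PySem.Str.pyGet? tk (index : Int)).getD ' '] ++ " " ++
       PySem.Str.slice tk (some ((index : Int) + 1)) (some ((index : Int) + 6)) ++ " " ++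
       PySem.Str.slice tk (some ((index : Int) + 6)) (some ((index : Int) + 12)) ++ " " ++
       PySem.Str.slice tk (some ((index : Int) + 12)) (some (PySem.Str.len a))) := by
  have h : dpScan tk 3 = 3 + dpDigitRun (PySem.Str.slice tk (some 3) none).toList := by
    rw [dpScan_eq]
    congr 1
    rw [PySem.Str.toList_slice, PySem.Chars.slice_eq_listSlice,
        PySem.List.slice_from tk.toList (by norm_num : (0:Int) ≤ 3)]
    rfl
  simp only [h]

-- A's inner step in canonical form: append the transformed element and the new joined prefix
theorem stepA_eq (s : List String × List String × List String × List String) (ab : String × String) :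
    dpStepA s ab =
      (s.1 ++ [dpReform ab.1], s.2.1 ++ [dpFirst ab.2],
       s.2.2.1 ++ [PySem.Str.join " " (s.1 ++ [dpReform ab.1])],
       s.2.2.2 ++ [PySem.Str.join " " (s.2.1 ++ [dpFirst ab.2])]) := by
  obtain ⟨d, d2, r, r2⟩ := s
  by_cases h : dpCond ab.1
  · simp only [dpStepA, dpReform, h, if_pos,
      PySem.List.foldl_append_singleton_eq_map
        (f := fun tk =>
          let index := dpScan tk 3
          PySem.Str.slice tk (some 0) (some (index : Int)) ++ " " ++
          String.ofList [(PySem.Str.pyGet? tk (index : Int)).getD ' '] ++ " " ++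
          PySem.Str.slice tk (some ((index : Int) + 1)) (some ((index : Int) + 6)) ++ " " ++
          PySem.Str.slice tk (some ((index : Int) + 6)) (some ((index : Int) + 12)) ++ " " ++
          PySem.Str.slice tk (some ((index : Int) + 12)) (some (PySem.Str.len ab.1)))]
    rw [List.map_congr_left (fun tk _ => token_eq ab.1 tk)]
    simp
  · simp [dpStepA, dpReform, h]

-- the inner loop computed with generalized accumulators
theorem inner_eq (l : List (String × String)) :
    ∀ (d d2 r r2 : List String),
      l.foldl dpStepA (d, d2, r, r2)
        = (d ++ l.map (fun ab => dpReform ab.1),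
           d2 ++ l.map (fun ab => dpFirst ab.2),
           ((l.map (fun ab => dpReform ab.1)).foldl dpPStep (dpJOpt d, r)).2,
           ((l.map (fun ab => dpFirst ab.2)).foldl dpPStep (dpJOpt d2, r2)).2) := by
  induction l with
  | nil => intro d d2 r r2; simp
  | cons ab l ih =>
    intro d d2 r r2
    rw [List.foldl_cons, stepA_eq, ih]
    simp only [List.map_cons, List.foldl_cons]
    rw [dpJOpt_append d (dpReform ab.1), dpJOpt_append d2 (dpFirst ab.2),
        join_append d (dpReform ab.1), join_append d2 (dpFirst ab.2)]
    simp [dpPStep]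

-- the outer loop is two maps
theorem outer_eq (L : List (List String × List String)) (o1 o2 : List (List String)) :
    L.foldl (fun st pr => (st.1 ++ [(dpInnerA pr).2.2.1], st.2 ++ [(dpInnerA pr).2.2.2])) (o1, o2)
      = (o1 ++ L.map (fun pr => (dpInnerA pr).2.2.1), o2 ++ L.map (fun pr => (dpInnerA pr).2.2.2)) := by
  rw [PySem.List.foldl_prod_mk (f := fun s pr => s ++ [(dpInnerA pr).2.2.1])
        (g := fun s pr => s ++ [(dpInnerA pr).2.2.2]),
      PySem.List.foldl_append_singleton_eq_map, PySem.List.foldl_append_singleton_eq_map]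

-- ===== VERDICT (by name: the statement is the Claim_ definition above) =====
theorem dataParse2_spec : Claim_equal_dataParse2 := by
  intro reqs ress _ _
  show dataParse2 reqs ress = dataParse2_alt reqs ress
  have hA : dataParse2 reqs ress
      = (reqs.zip ress).foldl
          (fun st pr => (st.1 ++ [(dpInnerA pr).2.2.1], st.2 ++ [(dpInnerA pr).2.2.2])) ([], []) := rfl
  rw [hA, outer_eq]
  have h1 : ∀ pr : List String × List String,
      (dpInnerA pr).2.2.1 = dpPrefixes ((pr.1.zip pr.2).map (fun ab => dpReform ab.1)) := by
    intro pr
    rw [dpInnerA, inner_eq]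
    rfl
  have h2 : ∀ pr : List String × List String,
      (dpInnerA pr).2.2.2 = dpPrefixes ((pr.1.zip pr.2).map (fun ab => dpFirst ab.2)) := by
    intro pr
    rw [dpInnerA, inner_eq]
    rfl
  simp only [dataParse2_alt, List.nil_append]
  exact Prod.ext (List.map_congr_left fun pr _ => h1 pr) (List.map_congr_left fun pr _ => h2 pr)
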